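-- pv_equiv track=rewrite | github.com/fabiogiglietto/toread | src/bibtex_parser.py | _is_field_complete
-- ===== SOURCE A (Python) =====
-- def _is_field_complete(value_str: str) -> bool:
--     """Check if a field value is complete (balanced braces/quotes)."""
--     brace_count = 0
--     quote_count = 0
--
--     for char in value_str:
--         if char == '{':
--             brace_count += 1
--         elif char == '}':
--             brace_count -= 1
--         elif char == '"':
--             quote_count += 1
--
--     return brace_count == 0 and quote_count % 2 == 0
-- ===== SOURCE B (Python) =====
-- def _is_field_complete(value_str: str) -> bool:
--     """Check if a field value is complete (balanced braces/quotes)."""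
--     def solve(lo, hi):
--         # summary of value_str[lo:hi]: (net brace balance, odd number of quotes?)
--         if hi <= lo:
--             return (0, False)
--         if hi == lo + 1:
--             c = value_str[lo]
--             return ((1 if c == '{' else -1 if c == '}' else 0), c == '"')
--         mid = (lo + hi) // 2
--         n1, p1 = solve(lo, mid)
--         n2, p2 = solve(mid, hi)
--         return (n1 + n2, p1 != p2)
--     net, odd = solve(0, len(value_str))
--     return net == 0 and not odd
-- ===== Notes on version B (the rewrite author's own statement) =====
-- stated objective: alternative
-- what changed: Replaces A's fused left-to-right accumulator loop with a divide-and-conquer recursion that computes a (net brace balance, quote parity) monoid summary for each half of the string and combines them (sum / xor), correct because both statistics are associative over concatenation.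
import Mathlib
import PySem

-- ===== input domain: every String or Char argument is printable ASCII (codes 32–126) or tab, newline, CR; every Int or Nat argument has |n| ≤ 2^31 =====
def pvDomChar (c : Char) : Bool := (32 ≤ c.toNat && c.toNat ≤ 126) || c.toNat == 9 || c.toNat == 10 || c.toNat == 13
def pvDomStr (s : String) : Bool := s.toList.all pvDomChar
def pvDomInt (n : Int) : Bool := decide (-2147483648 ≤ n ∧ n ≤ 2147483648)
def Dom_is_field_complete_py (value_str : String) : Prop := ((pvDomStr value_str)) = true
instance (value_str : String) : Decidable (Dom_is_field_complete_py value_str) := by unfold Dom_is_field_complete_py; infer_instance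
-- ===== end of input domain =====

-- B replaces A's fused accumulator loop with a divide-and-conquer recursion combining
-- (net brace balance, quote parity) summaries of the two halves (alternative; same cost).

-- ===== PORT A =====
-- literal port: one fold over the characters carrying (brace_count, quote_count)
def is_field_complete_py (value_str : String) : Bool :=
  let st := value_str.toList.foldl
    (fun (bq : Int × Int) char =>
      if char = '{' then (bq.1 + 1, bq.2)
      else if char = '}' then (bq.1 - 1, bq.2)
      else if char = '"' then (bq.1, bq.2 + 1)
      else bq)
    (0, 0)
  decide (st.1 = 0) && decide (PySem.Int.mod st.2 2 = 0)

-- ===== PORT B =====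
-- Source B's inner `solve(lo, hi)`: divide and conquer on the index interval.
-- every call has lo < l.length when it reads s[lo], so `getD lo ' '` is exact there.
def pvSolveB (l : List Char) (lo hi : Nat) : Int × Bool :=
  if _h1 : hi ≤ lo then (0, false)
  else if _h2 : hi = lo + 1 then
    let c := l.getD lo ' '
    ((if c = '{' then (1 : Int) else if c = '}' then -1 else 0), decide (c = '"'))
  else
    let mid := (lo + hi) / 2
    let r1 := pvSolveB l lo mid
    let r2 := pvSolveB l mid hi
    (r1.1 + r2.1, r1.2 != r2.2)
termination_by hi - lo
decreasing_by all_goals omega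

def is_field_complete_py_alt (value_str : String) : Bool :=
  let r := pvSolveB value_str.toList 0 value_str.toList.length
  decide (r.1 = 0) && !r.2

-- ===== PRECONDITION & SPEC =====
def Spec_is_field_complete_py (value_str : String) (out : Bool) : Prop := out = is_field_complete_py_alt value_str
instance (value_str : String) (out : Bool) : Decidable (Spec_is_field_complete_py value_str out) := by unfold Spec_is_field_complete_py; infer_instance

-- ===== CLAIM (what is proved, stated in full; the proofs are below) =====
def Claim_equal_is_field_complete_py : Prop := ∀ (value_str : String), Dom_is_field_complete_py value_str → Spec_is_field_complete_py value_str (is_field_complete_py value_str)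

-- ===== LEMMAS AND PROOFS =====

-- the two summaries, as functions of a character segment
def pvNet (m : List Char) : Int := (m.count '{' : Int) - (m.count '}' : Int)
def pvOdd (m : List Char) : Bool := (m.count '"') % 2 == 1

theorem pvNet_append (x y : List Char) : pvNet (x ++ y) = pvNet x + pvNet y := by
  simp [pvNet, List.count_append]; ring

theorem pvOdd_append (x y : List Char) : pvOdd (x ++ y) = (pvOdd x != pvOdd y) := by
  simp only [pvOdd, List.count_append]
  rcases Nat.mod_two_eq_zero_or_one (x.count '"') with h1 | h1 <;>
    rcases Nat.mod_two_eq_zero_or_one (y.count '"') with h2 | h2 <;>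
      simp [Nat.add_mod, h1, h2]

-- the fused fold of A computes (pvNet, quote count)
theorem pv_fold_counts (l : List Char) (b q : Int) :
    l.foldl
      (fun (bq : Int × Int) char =>
        if char = '{' then (bq.1 + 1, bq.2)
        else if char = '}' then (bq.1 - 1, bq.2)
        else if char = '"' then (bq.1, bq.2 + 1)
        else bq)
      (b, q)
    = (b + (l.count '{' : Int) - (l.count '}' : Int), q + (l.count '"' : Int)) := by
  induction l generalizing b q with
  | nil => simp
  | cons h t ih =>
    by_cases h1 : h = '{'
    · simp [h1, ih]; ring
    · by_cases h2 : h = '}'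
      · simp [h2, ih]; ring
      · by_cases h3 : h = '"'
        · simp [h3, ih]; ring
        · simp [h1, h2, h3, ih]

-- the divide-and-conquer recursion computes both summaries of the segment [lo, hi)
theorem pvSolveB_eq (l : List Char) : ∀ (k lo hi : Nat), hi - lo ≤ k → hi ≤ l.length →
    pvSolveB l lo hi = (pvNet ((l.drop lo).take (hi - lo)), pvOdd ((l.drop lo).take (hi - lo))) := by
  intro k
  induction k with
  | zero =>
    intro lo hi hk _
    have h1 : hi ≤ lo := by omega
    rw [pvSolveB]
    simp [h1, show hi - lo = 0 by omega, pvNet, pvOdd]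
  | succ k ih =>
    intro lo hi hk hlen
    by_cases h1 : hi ≤ lo
    · rw [pvSolveB]; simp [h1, show hi - lo = 0 by omega, pvNet, pvOdd]
    · by_cases h2 : hi = lo + 1
      · subst h2
        rw [pvSolveB]
        have hlo : lo < l.length := by omega
        rw [dif_neg h1, dif_pos rfl]
        have hdrop : l.drop lo = l[lo] :: l.drop (lo + 1) := List.drop_eq_getElem_cons hlo
        have hget : l.getD lo ' ' = l[lo] := by
          simp [List.getD, List.getElem?_eq_getElem hlo]
        simp only [hget, hdrop, show lo + 1 - lo = 1 by omega, List.take_succ_cons,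
          List.take_zero]
        by_cases c1 : l[lo] = '{'
        · simp [pvNet, pvOdd, c1]
        · by_cases c2 : l[lo] = '}'
          · simp [pvNet, pvOdd, c2]
          · by_cases c3 : l[lo] = '"' <;> simp [pvNet, pvOdd, c1, c2, c3]
      · rw [pvSolveB, dif_neg h1, dif_neg h2]
        change ((pvSolveB l lo ((lo + hi) / 2)).1 + (pvSolveB l ((lo + hi) / 2) hi).1,
          (pvSolveB l lo ((lo + hi) / 2)).2 != (pvSolveB l ((lo + hi) / 2) hi).2) = _
        have hm1 : lo < (lo + hi) / 2 := by omega
        have hm2 : (lo + hi) / 2 < hi := by omega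
        rw [ih lo ((lo + hi) / 2) (by omega) (by omega),
            ih ((lo + hi) / 2) hi (by omega) hlen]
        have hseg : (l.drop lo).take (hi - lo)
            = (l.drop lo).take ((lo + hi) / 2 - lo)
              ++ (l.drop ((lo + hi) / 2)).take (hi - (lo + hi) / 2) := by
          rw [show hi - lo = ((lo + hi) / 2 - lo) + (hi - (lo + hi) / 2) by omega,
              List.take_add, List.drop_drop]
          simp [show lo + ((lo + hi) / 2 - lo) = (lo + hi) / 2 from by omega]
        rw [hseg, pvNet_append, pvOdd_append]

theorem pv_mod_parity (n : Nat) :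
    decide (PySem.Int.mod (n : Int) 2 = 0) = !((n % 2 == 1)) := by
  rw [PySem.Int.mod_eq_emod_of_pos (by norm_num)]
  rcases Nat.mod_two_eq_zero_or_one n with h | h <;>
    · have : (n : Int) % 2 = ((n % 2 : Nat) : Int) := by push_cast; ring_nf
      simp [this, h]

-- ===== VERDICT (by name: the statement is the Claim_ definition above) =====
theorem is_field_complete_py_spec : Claim_equal_is_field_complete_py := by
  intro s _
  unfold Spec_is_field_complete_py is_field_complete_py is_field_complete_py_alt
  rw [pv_fold_counts,
      pvSolveB_eq s.toList s.toList.length 0 s.toList.length (by omega) le_rfl]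
  simp only [Nat.sub_zero, List.drop_zero, List.take_length, zero_add]
  rw [pv_mod_parity]
  simp only [pvNet, pvOdd]
  rfl
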